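-- pv_equiv track=rewrite | github.com/guaardvark/guaardvark | backend/utils/rag_enhanced_output.py | _build_entity_relationships
-- ===== SOURCE A (Python) =====
-- from typing import Dict, List, Optional, Any
--
-- def _build_entity_relationships(
--     entities: List[str], docs: List[Dict[str, Any]]
-- ) -> Dict[str, List[str]]:
--     """Build entity relationship map"""
--     relationships = {}
--
--     # Simple co-occurrence based relationships
--     for entity in entities:
--         related = []
--         for doc in docs:
--             text = doc.get("text", "").lower()
--             if entity.lower() in text:
--                 # Find other entities in same document
--                 for other_entity in entities:
--                     if other_entity != entity and other_entity.lower() in text: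
--                         if other_entity not in related:
--                             related.append(other_entity)
--
--         if related:
--             relationships[entity] = related[:5]  # Limit to top 5 related
--
--     return relationships
-- ===== SOURCE B (Python) =====
-- from typing import Dict, List, Any
--
-- def _build_entity_relationships(
--     entities: List[str], docs: List[Dict[str, Any]]
-- ) -> Dict[str, List[str]]:
--     """Build entity relationship map (doc-major accumulation instead of entity-major rescans)"""
--     uniq = list(dict.fromkeys(entities))
--     rel = {e: [] for e in uniq}
--     # Single doc-major pass: each doc's present entities co-occur pairwise.
--     for doc in docs:
--         text = doc.get("text", "").lower()
--         present = [e for e in uniq if e.lower() in text]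
--         for p in present:
--             for o in present:
--                 if o != p and o not in rel[p]:
--                     rel[p].append(o)
--     relationships = {}
--     for entity in entities:
--         if rel[entity]:
--             relationships[entity] = rel[entity][:5]
--     return relationships
-- ===== Notes on version B (the rewrite author's own statement) =====
-- stated objective: faster
-- what changed: B is doc-major instead of entity-major: it dedups the entities once, does one pass over the docs computing each doc's present entities once and accumulating every present entity's co-occurrence list in a dict, then emits the per-entity lists; A instead rescans all docs and re-tests every other entity's substring separately for each entity.
import Mathlib
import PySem

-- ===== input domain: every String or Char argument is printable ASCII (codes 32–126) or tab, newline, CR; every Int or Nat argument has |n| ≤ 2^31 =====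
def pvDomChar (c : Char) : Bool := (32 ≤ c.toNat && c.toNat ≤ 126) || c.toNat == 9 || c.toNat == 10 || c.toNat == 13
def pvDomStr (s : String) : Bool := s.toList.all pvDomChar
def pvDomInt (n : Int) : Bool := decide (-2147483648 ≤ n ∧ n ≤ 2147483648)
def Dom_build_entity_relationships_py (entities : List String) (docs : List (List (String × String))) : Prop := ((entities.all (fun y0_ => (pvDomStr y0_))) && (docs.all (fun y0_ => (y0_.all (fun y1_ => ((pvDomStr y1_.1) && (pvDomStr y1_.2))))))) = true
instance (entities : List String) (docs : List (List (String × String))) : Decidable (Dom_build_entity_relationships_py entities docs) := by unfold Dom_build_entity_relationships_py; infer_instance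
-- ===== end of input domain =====

-- B replaces A's entity-major rescans (for every entity, rescan every doc and re-test every other
-- entity's substring) by one doc-major pass: dedup the entities once, compute each doc's present
-- entities once, and accumulate every present entity's co-occurrence list in a dict; same return value.


-- ===== PORT A =====
def build_entity_relationships_py (entities : List String) (docs : List (List (String × String))) : List (String × List String) :=
  (entities.foldl (fun (relationships : PySem.Dict String (List String)) entity =>
    let related := docs.foldl (fun related doc =>
      let text := PySem.Str.lower ((PySem.Dict.mk doc).getD "text" "")
      if PySem.Str.isIn (PySem.Str.lower entity) text then
        entities.foldl (fun related other =>
          if other ≠ entity ∧ PySem.Str.isIn (PySem.Str.lower other) text ∧ other ∉ related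
          then related ++ [other] else related) related
      else related) []
    if related ≠ [] then relationships.insert entity (related.take 5) else relationships)
    PySem.Dict.empty).items

-- ===== PORT B =====
-- rel[p] in the Python can never raise: every p comes from uniq, the keys of rel; so getD/modify
-- with default [] is exact here.
def build_entity_relationships_py_alt (entities : List String) (docs : List (List (String × String))) : List (String × List String) :=
  let uniq := PySem.List.dedup entities
  let rel := docs.foldl (fun (rel : PySem.Dict String (List String)) doc =>
    let text := PySem.Str.lower ((PySem.Dict.mk doc).getD "text" "")
    let present := uniq.filter (fun e => PySem.Str.isIn (PySem.Str.lower e) text)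
    present.foldl (fun rel p =>
      present.foldl (fun rel o =>
        if o ≠ p ∧ o ∉ rel.getD p [] then rel.modify p [] (· ++ [o]) else rel) rel) rel)
    (uniq.foldl (fun (d : PySem.Dict String (List String)) e => d.insert e []) PySem.Dict.empty)
  (entities.foldl (fun (relationships : PySem.Dict String (List String)) entity =>
    if rel.getD entity [] ≠ [] then relationships.insert entity ((rel.getD entity []).take 5) else relationships)
    PySem.Dict.empty).items

-- ===== PRECONDITION & SPEC =====
def Spec_build_entity_relationships_py (entities : List String) (docs : List (List (String × String))) (out : List (String × List String)) : Prop := out = build_entity_relationships_py_alt entities docs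
instance (entities : List String) (docs : List (List (String × String))) (out : List (String × List String)) : Decidable (Spec_build_entity_relationships_py entities docs out) := by unfold Spec_build_entity_relationships_py; infer_instance

-- ===== CLAIM (what is proved, stated in full; the proofs are below) =====
def Claim_equal_build_entity_relationships_py : Prop := ∀ (entities : List String) (docs : List (List (String × String))), Dom_build_entity_relationships_py entities docs → Spec_build_entity_relationships_py entities docs (build_entity_relationships_py entities docs)

-- ===== LEMMAS AND PROOFS =====

-- the "append other if new" step both programs share, per fixed entity e
def pvStep (e : String) (related : List String) (o : String) : List String :=
  if o ≠ e ∧ o ∉ related then related ++ [o] else related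

theorem pvStep_mono {e y : String} {acc : List String} (h : y ∈ acc) (o : String) :
    y ∈ pvStep e acc o := by
  unfold pvStep; split_ifs with h1
  · exact List.mem_append_left _ h
  · exact h

-- A's inner scan over all entities = scan over the text-filtered entities with pvStep
theorem pv_inner (e text : String) (entities acc : List String) :
    entities.foldl (fun related other =>
        if other ≠ e ∧ PySem.Str.isIn (PySem.Str.lower other) text ∧ other ∉ related
        then related ++ [other] else related) acc
    = (entities.filter (fun x => PySem.Str.isIn (PySem.Str.lower x) text)).foldl (pvStep e) acc := by
  induction entities generalizing acc with
  | nil => rfl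
  | cons z zs ih =>
    simp only [List.foldl_cons, List.filter_cons]
    by_cases h : PySem.Str.isIn (PySem.Str.lower z) text = true
    · rw [if_pos h, List.foldl_cons]
      unfold pvStep
      by_cases h2 : z ≠ e ∧ z ∉ acc
      · rw [if_pos ⟨h2.1, h, h2.2⟩, if_pos h2]; exact ih _
      · rw [if_neg (by tauto), if_neg h2]; exact ih _
    · rw [if_neg h, if_neg (by tauto)]
      exact ih _

-- occurrences of y are no-ops for pvStep e once y = e or y ∈ acc
theorem pv_erase (e y : String) (ys acc : List String) (hy : y = e ∨ y ∈ acc) :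
    ys.foldl (pvStep e) acc = (ys.filter (fun z => z != y)).foldl (pvStep e) acc := by
  induction ys generalizing acc with
  | nil => rfl
  | cons z zs ih =>
    simp only [List.foldl_cons, List.filter_cons]
    by_cases hz : z = y
    · subst hz
      have hstep : pvStep e acc z = acc := by
        unfold pvStep
        rcases hy with h | h
        · rw [if_neg (by tauto)]
        · rw [if_neg (by tauto)]
      simp only [bne_self_eq_false]
      rw [hstep]
      exact ih acc hy
    · have : (z != y) = true := by simp [bne, hz]
      rw [this, if_pos rfl, List.foldl_cons]
      refine ih (pvStep e acc z) ?_
      rcases hy with h | h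
      · exact Or.inl h
      · exact Or.inr (pvStep_mono h z)

-- PySem.Set.add facts used to unfold dedup one step
theorem pv_add_skip (x : String) (xs s : List String) (hx : x ∈ s) :
    xs.foldl PySem.Set.add s = (xs.filter (fun z => z != x)).foldl PySem.Set.add s := by
  induction xs generalizing s with
  | nil => rfl
  | cons z zs ih =>
    simp only [List.foldl_cons, List.filter_cons]
    by_cases hz : z = x
    · subst hz
      have : PySem.Set.add s z = s := by
        unfold PySem.Set.add
        rw [if_pos (by simpa using hx)]
      simp only [bne_self_eq_false]
      rw [this]
      exact ih s hx
    · have : (z != x) = true := by simp [bne, hz]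
      rw [this, if_pos rfl, List.foldl_cons]
      refine ih _ ?_
      unfold PySem.Set.add
      split_ifs
      · exact hx
      · exact List.mem_append_left _ hx

theorem pv_cons_add (x : String) (ys s : List String) (hx : x ∉ ys) :
    ys.foldl PySem.Set.add (x :: s) = x :: ys.foldl PySem.Set.add s := by
  induction ys generalizing s with
  | nil => rfl
  | cons z zs ih =>
    simp only [List.foldl_cons]
    have hzx : z ≠ x := fun h => hx (h ▸ List.mem_cons_self ..)
    have hc : PySem.Set.add (x :: s) z = x :: PySem.Set.add s z := by
      unfold PySem.Set.add
      have hcc : (PySem.Set.contains (x :: s) z) = (PySem.Set.contains s z) := by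
        simp [PySem.Set.contains, hzx]
      rw [hcc]
      split_ifs <;> simp
    rw [hc]
    exact ih _ (fun h => hx (List.mem_cons_of_mem _ h))

theorem pv_dedup_cons (x : String) (xs : List String) :
    PySem.List.dedup (x :: xs) = x :: PySem.List.dedup (xs.filter (fun z => z != x)) := by
  unfold PySem.List.dedup PySem.Set.ofList
  simp only [List.foldl_cons]
  have h1 : PySem.Set.add PySem.Set.empty x = [x] := rfl
  rw [h1, pv_add_skip x xs [x] (List.mem_singleton.mpr rfl),
      pv_cons_add x _ [] (by simp)]
  rfl

-- folding pvStep over a list = folding it over the list's ordered dedup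
theorem pv_fold_dedup (e : String) : ∀ (n : Nat) (xs acc : List String), xs.length ≤ n →
    xs.foldl (pvStep e) acc = (PySem.List.dedup xs).foldl (pvStep e) acc := by
  intro n
  induction n with
  | zero => intro xs acc h; rw [List.length_eq_zero_iff.mp (Nat.le_zero.mp h)]; rfl
  | succ n ih =>
    intro xs acc h
    match xs with
    | [] => rfl
    | x :: rest =>
      rw [pv_dedup_cons, List.foldl_cons, List.foldl_cons]
      have hy : x = e ∨ x ∈ pvStep e acc x := by
        unfold pvStep
        by_cases hxe : x = e
        · exact Or.inl hxe
        · by_cases hxa : x ∈ acc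
          · exact Or.inr (by rw [if_neg (by tauto)]; exact hxa)
          · exact Or.inr (by rw [if_pos ⟨hxe, hxa⟩]; simp)
      rw [pv_erase e x rest (pvStep e acc x) hy]
      exact ih _ _ (le_trans (List.length_filter_le _ _) (by simpa using Nat.lt_succ_iff.mp (by simpa using h)))

theorem pv_dedup_filter (p : String → Bool) (xs : List String) :
    PySem.List.dedup (xs.filter p) = (PySem.List.dedup xs).filter p := by
  suffices h : ∀ (xs s : List String),
      (xs.filter p).foldl PySem.Set.add (s.filter p) = (xs.foldl PySem.Set.add s).filter p by
    have := h xs []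
    simpa [PySem.List.dedup, PySem.Set.ofList, PySem.Set.empty] using this
  intro xs
  induction xs with
  | nil => intro s; rfl
  | cons x rest ih =>
    intro s
    simp only [List.filter_cons, List.foldl_cons]
    have hadd : (PySem.Set.add s x).filter p = if p x then PySem.Set.add (s.filter p) x else s.filter p := by
      unfold PySem.Set.add
      by_cases hpx : p x = true
      · have hmem : PySem.Set.contains (s.filter p) x = PySem.Set.contains s x := by
          simp [PySem.Set.contains, List.mem_filter, hpx]
        rw [if_pos hpx, hmem]
        split_ifs with hc
        · rfl
        · simp [List.filter_append, hpx]
      · have hpx' : p x = false := by simpa using hpx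
        rw [if_neg hpx]
        split_ifs with hc
        · rfl
        · simp [List.filter_append, hpx']
    by_cases hpx : p x = true
    · rw [if_pos hpx, List.foldl_cons, ← ih, hadd, if_pos hpx]
    · rw [if_neg hpx, ← ih, hadd, if_neg hpx]

-- ----- dict-side lemmas for B's doc-major accumulation -----

-- the o-loop for a key p ≠ e does not touch key e
theorem pv_oLoop_ne (e p : String) (hpe : p ≠ e) (os : List String)
    (rel : PySem.Dict String (List String)) :
    (os.foldl (fun rel o =>
        if o ≠ p ∧ o ∉ rel.getD p [] then rel.modify p [] (· ++ [o]) else rel) rel).getD e []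
    = rel.getD e [] := by
  induction os generalizing rel with
  | nil => rfl
  | cons o os ih =>
    simp only [List.foldl_cons]
    rw [ih]
    split_ifs with h
    · exact PySem.Dict.getD_modify_of_ne rel [] _ (Ne.symm hpe)
    · rfl

-- the o-loop for key e is pvStep e on rel[e]
theorem pv_oLoop_self (e : String) (os : List String)
    (rel : PySem.Dict String (List String)) :
    (os.foldl (fun rel o =>
        if o ≠ e ∧ o ∉ rel.getD e [] then rel.modify e [] (· ++ [o]) else rel) rel).getD e []
    = os.foldl (pvStep e) (rel.getD e []) := by
  induction os generalizing rel with
  | nil => rfl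
  | cons o os ih =>
    simp only [List.foldl_cons]
    by_cases h : o ≠ e ∧ o ∉ rel.getD e []
    · rw [if_pos h, ih]
      have : (rel.modify e [] (· ++ [o])).getD e [] = rel.getD e [] ++ [o] :=
        PySem.Dict.getD_modify_self rel e [] _
      rw [this]
      unfold pvStep
      rw [if_pos h]
    · rw [if_neg h, ih]
      unfold pvStep
      rw [if_neg h]

-- the p-loop over a list avoiding e does not touch key e
theorem pv_pLoop_skip (e : String) (present ps : List String) (he : e ∉ ps)
    (rel : PySem.Dict String (List String)) :
    (ps.foldl (fun rel p =>
        present.foldl (fun rel o =>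
          if o ≠ p ∧ o ∉ rel.getD p [] then rel.modify p [] (· ++ [o]) else rel) rel) rel).getD e []
    = rel.getD e [] := by
  induction ps generalizing rel with
  | nil => rfl
  | cons p ps ih =>
    simp only [List.foldl_cons]
    rw [ih (fun h => he (List.mem_cons_of_mem _ h)),
        pv_oLoop_ne e p (fun h => he (h ▸ List.mem_cons_self ..)) present rel]

-- the full p-loop, on key e ∈ present (present nodup): list-level pvStep fold over present
theorem pv_pLoop (e : String) (present : List String) (hnd : present.Nodup) (he : e ∈ present)
    (rel : PySem.Dict String (List String)) :
    (present.foldl (fun rel p =>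
        present.foldl (fun rel o =>
          if o ≠ p ∧ o ∉ rel.getD p [] then rel.modify p [] (· ++ [o]) else rel) rel) rel).getD e []
    = present.foldl (pvStep e) (rel.getD e []) := by
  obtain ⟨l1, l2, hsplit⟩ := List.append_of_mem he
  have hnd' := hnd
  rw [hsplit] at hnd'
  have he1 : e ∉ l1 := by
    intro h
    exact (List.disjoint_of_nodup_append hnd') h (List.mem_cons_self ..)
  have he2 : e ∉ l2 := by
    have := (List.nodup_append.mp hnd').2.1
    simpa using (List.nodup_cons.mp this).1
  subst hsplit
  rw [List.foldl_append, List.foldl_cons]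
  rw [pv_pLoop_skip e (l1 ++ e :: l2) l2 he2, pv_oLoop_self, pv_pLoop_skip e (l1 ++ e :: l2) l1 he1]

-- the initial dict {e: [] for e in uniq} is [] at every key
theorem pv_init (ks : List String) (d : PySem.Dict String (List String))
    (hd : ∀ y, d.getD y [] = []) (x : String) :
    ((ks.foldl (fun (d : PySem.Dict String (List String)) e => d.insert e []) d).getD x []) = [] := by
  induction ks generalizing d with
  | nil => exact hd x
  | cons k ks ih =>
    simp only [List.foldl_cons]
    refine ih _ ?_
    intro y
    by_cases hy : y = k
    · subst hy; exact PySem.Dict.getD_insert_self d y [] []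
    · rw [PySem.Dict.getD_insert_of_ne d [] [] hy]; exact hd y

-- B's docs fold, read at key e ∈ dedup entities, is the canonical per-entity docs fold
set_option maxHeartbeats 1000000 in
theorem pv_docs (entities : List String) (e : String) (he : e ∈ PySem.List.dedup entities)
    (docs : List (List (String × String))) (rel : PySem.Dict String (List String)) :
    (docs.foldl (fun rel doc =>
        ((PySem.List.dedup entities).filter (fun x => PySem.Str.isIn (PySem.Str.lower x) (PySem.Str.lower ((PySem.Dict.mk doc).getD "text" "")))).foldl
          (fun rel p =>
            ((PySem.List.dedup entities).filter (fun x => PySem.Str.isIn (PySem.Str.lower x) (PySem.Str.lower ((PySem.Dict.mk doc).getD "text" "")))).foldl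
              (fun rel o =>
                if o ≠ p ∧ o ∉ rel.getD p [] then rel.modify p [] (· ++ [o]) else rel) rel) rel) rel).getD e []
    = docs.foldl (fun related doc =>
        if PySem.Str.isIn (PySem.Str.lower e) (PySem.Str.lower ((PySem.Dict.mk doc).getD "text" "")) then
          ((PySem.List.dedup entities).filter (fun x => PySem.Str.isIn (PySem.Str.lower x) (PySem.Str.lower ((PySem.Dict.mk doc).getD "text" "")))).foldl
            (pvStep e) related
        else related) (rel.getD e []) := by
  induction docs generalizing rel with
  | nil => rfl
  | cons doc docs ih =>
    simp only [List.foldl_cons]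
    rw [ih]
    by_cases h : PySem.Str.isIn (PySem.Str.lower e) (PySem.Str.lower ((PySem.Dict.mk doc).getD "text" "")) = true
    · rw [if_pos h,
        pv_pLoop e _ ((PySem.List.nodup_dedup entities).filter _)
          (List.mem_filter.mpr ⟨he, h⟩) rel]
    · rw [if_neg h,
        pv_pLoop_skip e _ _ (fun hx => h (List.mem_filter.mp hx).2) rel]

-- the two ports agree
set_option maxHeartbeats 1000000 in
theorem pv_eq (entities : List String) (docs : List (List (String × String))) :
    build_entity_relationships_py entities docs = build_entity_relationships_py_alt entities docs := by
  unfold build_entity_relationships_py build_entity_relationships_py_alt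
  refine congrArg PySem.Dict.items (List.foldl_ext _ _ _ ?_)
  intro d e hmem
  have he : e ∈ PySem.List.dedup entities := (PySem.List.mem_dedup entities e).mpr hmem
  have hkey :
      (docs.foldl (fun rel doc =>
          ((PySem.List.dedup entities).filter (fun x => PySem.Str.isIn (PySem.Str.lower x)
              (PySem.Str.lower ((PySem.Dict.mk doc).getD "text" "")))).foldl
            (fun rel p =>
              ((PySem.List.dedup entities).filter (fun x => PySem.Str.isIn (PySem.Str.lower x)
                  (PySem.Str.lower ((PySem.Dict.mk doc).getD "text" "")))).foldl
                (fun rel o =>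
                  if o ≠ p ∧ o ∉ rel.getD p [] then rel.modify p [] (· ++ [o]) else rel) rel) rel)
          ((PySem.List.dedup entities).foldl
            (fun (d : PySem.Dict String (List String)) e => d.insert e []) PySem.Dict.empty)).getD e []
      = docs.foldl (fun related doc =>
          if PySem.Str.isIn (PySem.Str.lower e) (PySem.Str.lower ((PySem.Dict.mk doc).getD "text" "")) then
            entities.foldl (fun related other =>
              if other ≠ e ∧ PySem.Str.isIn (PySem.Str.lower other)
                    (PySem.Str.lower ((PySem.Dict.mk doc).getD "text" "")) ∧ other ∉ related
              then related ++ [other] else related) related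
          else related) [] := by
    rw [pv_docs entities e he docs _,
        pv_init (PySem.List.dedup entities) PySem.Dict.empty (fun _ => rfl) e]
    refine (List.foldl_ext _ _ _ ?_).symm
    intro acc doc _
    by_cases h : PySem.Str.isIn (PySem.Str.lower e)
        (PySem.Str.lower ((PySem.Dict.mk doc).getD "text" "")) = true
    · rw [if_pos h, if_pos h]
      rw [pv_inner e _ entities acc,
          pv_fold_dedup e (entities.filter _).length _ acc le_rfl,
          pv_dedup_filter]
    · rw [if_neg h, if_neg h]
  rw [hkey]

-- ===== VERDICT (by name: the statement is the Claim_ definition above) =====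
theorem build_entity_relationships_py_spec : Claim_equal_build_entity_relationships_py := by
  intro entities docs _
  exact pv_eq entities docs
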